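-- pv_equiv track=rewrite | github.com/karlebh/DSA | Stack/anagram.py | anagram_1
-- ===== SOURCE A (Python) =====
-- def anagram_1(string_1, string_2):
-- 	stringTwoList = list(string_2)
--
-- 	postion_1 = 0
-- 	still_ok = True
--
-- 	while postion_1 < len(string_1) and still_ok:
-- 		postion_2 = 0
-- 		found = False
--
-- 		while postion_2 < len(stringTwoList) and not found:
-- 			if string_1[postion_1] == stringTwoList[postion_2]:
-- 				found = True
-- 			else:
-- 				postion_2 = postion_2 + 1
-- 		if found:
-- 			stringTwoList[postion_2] = None
-- 			# still_ok = True
-- 		else: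
-- 			still_ok = False
--
-- 		postion_1 = postion_1 + 1
--
-- 	return still_ok
-- ===== SOURCE B (Python) =====
-- def anagram_1(string_1, string_2):
--     chars_1 = list(string_1)
--     chars_2 = list(string_2)
--     return all(chars_1.count(c) <= chars_2.count(c) for c in set(chars_1))
-- ===== Notes on version B (the rewrite author's own statement) =====
-- stated objective: faster
-- what changed: Replaced the nested search-and-mark over a mutable copy of string_2 by a per-distinct-character count comparison: for each distinct char of string_1, check its count in string_1 does not exceed its count in string_2 (no marking, no mutation).
import Mathlib
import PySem

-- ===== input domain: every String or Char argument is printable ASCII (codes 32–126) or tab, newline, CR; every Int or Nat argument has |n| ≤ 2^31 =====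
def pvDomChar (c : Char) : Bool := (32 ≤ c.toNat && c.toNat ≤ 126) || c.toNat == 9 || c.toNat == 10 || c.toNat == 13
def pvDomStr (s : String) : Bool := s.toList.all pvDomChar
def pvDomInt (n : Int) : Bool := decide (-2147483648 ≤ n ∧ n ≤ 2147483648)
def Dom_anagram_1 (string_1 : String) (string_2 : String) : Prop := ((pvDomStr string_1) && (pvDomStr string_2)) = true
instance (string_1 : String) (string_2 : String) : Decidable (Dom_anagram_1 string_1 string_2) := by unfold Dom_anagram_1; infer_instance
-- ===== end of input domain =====

-- B replaces A's nested search-and-mark over a mutable copy of string_2 by a per-distinct-char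
-- count comparison (simpler: no marking, no mutation; equal return value everywhere).


-- ===== PORT A =====
-- inner while loop: scan stringTwoList from postion_2 = 0 for the first cell equal to
-- string_1[postion_1]; returns its index (found = True) or none (found stays False)
def pvFindA (c : Char) (l : List (Option Char)) : Option Nat :=
  match l with
  | [] => none
  | x :: xs => if x = some c then some 0 else (pvFindA c xs).map (· + 1)

-- outer while loop over postion_1 with state (stringTwoList, still_ok); marking
-- stringTwoList[postion_2] = None is List.set, not-found sets still_ok = False and exits
def pvLoopA (cs : List Char) (l : List (Option Char)) : Bool :=
  match cs with
  | [] => true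
  | c :: rest =>
    match pvFindA c l with
    | some j => pvLoopA rest (l.set j none)
    | none => false

def anagram_1 (string_1 : String) (string_2 : String) : Bool :=
  pvLoopA string_1.toList (string_2.toList.map (fun c => some c))

-- ===== PORT B =====
def anagram_1_alt (string_1 : String) (string_2 : String) : Bool :=
  let chars_1 := string_1.toList
  let chars_2 := string_2.toList
  (PySem.Set.ofList chars_1).all (fun c => chars_1.count c ≤ chars_2.count c)

-- ===== PRECONDITION & SPEC =====
def Spec_anagram_1 (string_1 : String) (string_2 : String) (out : Bool) : Prop := out = anagram_1_alt string_1 string_2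
instance (string_1 : String) (string_2 : String) (out : Bool) : Decidable (Spec_anagram_1 string_1 string_2 out) := by unfold Spec_anagram_1; infer_instance

-- ===== CLAIM (what is proved, stated in full; the proofs are below) =====
def Claim_equal_anagram_1 : Prop := ∀ (string_1 : String) (string_2 : String), Dom_anagram_1 string_1 string_2 → Spec_anagram_1 string_1 string_2 (anagram_1 string_1 string_2)

-- ===== LEMMAS AND PROOFS =====

theorem pvFindA_eq_none_iff (c : Char) (l : List (Option Char)) :
    pvFindA c l = none ↔ some c ∉ l := by
  induction l with
  | nil => simp [pvFindA]
  | cons x xs ih =>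
    simp only [pvFindA]
    split
    · simp_all
    · cases h : pvFindA c xs <;> simp_all [eq_comm]

theorem pvFindA_count (c : Char) (l : List (Option Char)) (j : Nat)
    (h : pvFindA c l = some j) (d : Char) :
    l.count (some d) = (l.set j none).count (some d) + (if d = c then 1 else 0) := by
  induction l generalizing j with
  | nil => simp [pvFindA] at h
  | cons x xs ih =>
    simp only [pvFindA] at h
    split at h
    · rename_i hx
      have hj : j = 0 := by simpa using h.symm
      subst hj; subst hx
      by_cases hd : d = c
      · subst hd; simp
      · simp [hd, Ne.symm hd]
    · cases hfind : pvFindA c xs with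
      | none => simp [hfind] at h
      | some k =>
        have hj : j = k + 1 := by simp [hfind] at h; omega
        subst hj
        have hx2 := ih k hfind
        by_cases hxd : x = some d <;> by_cases hd : d = c <;>
          simp only [List.set_cons_succ, List.count_cons, hxd, hd, if_false,
            beq_self_eq_true, if_pos, hx2] <;> simp [hxd, hd] at hx2 ⊢ <;> omega

theorem pvLoopA_iff (cs : List Char) (l : List (Option Char)) :
    pvLoopA cs l = true ↔ ∀ c, cs.count c ≤ l.count (some c) := by
  induction cs generalizing l with
  | nil => simp [pvLoopA]
  | cons c rest ih =>
    simp only [pvLoopA]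
    cases hfind : pvFindA c l with
    | none =>
      have hmem : some c ∉ l := (pvFindA_eq_none_iff c l).mp hfind
      have hcnt : l.count (some c) = 0 := List.count_eq_zero.mpr hmem
      simp only [Bool.false_eq_true, false_iff]
      intro hall
      have hc := hall c
      rw [List.count_cons_self, hcnt] at hc
      omega
    | some j =>
      rw [ih]
      constructor
      · intro hall d
        have hc2 := pvFindA_count c l j hfind d
        have hd := hall d
        rw [List.count_cons]
        by_cases h : d = c
        · subst h; simp at hc2 ⊢; omega
        · simp [h, Ne.symm h] at hc2 ⊢; omega
      · intro hall d
        have hc2 := pvFindA_count c l j hfind d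
        have hd := hall d
        rw [List.count_cons] at hd
        by_cases h : d = c
        · subst h; simp at hc2 hd ⊢; omega
        · simp [h, Ne.symm h] at hc2 hd ⊢; omega

theorem anagram_1_alt_iff (s1 s2 : String) :
    anagram_1_alt s1 s2 = true ↔ ∀ c ∈ s1.toList, s1.toList.count c ≤ s2.toList.count c := by
  simp only [anagram_1_alt, List.all_eq_true]
  constructor
  · intro h c hc
    simpa using h c ((PySem.Set.mem_ofList _ c).mpr hc)
  · intro h c hc
    simpa using h c ((PySem.Set.mem_ofList _ c).mp hc)

theorem count_map_some (l : List Char) (c : Char) :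
    (l.map (fun c => some c)).count (some c) = l.count c :=
  List.count_map_of_injective l (fun c => some c) (fun a b h => by simpa using h) c

-- ===== VERDICT (by name: the statement is the Claim_ definition above) =====
theorem anagram_1_spec : Claim_equal_anagram_1 := by
  intro s1 s2 _
  unfold Spec_anagram_1
  rw [Bool.eq_iff_iff, anagram_1_alt_iff]
  unfold anagram_1
  rw [pvLoopA_iff]
  constructor
  · intro h c _
    have := h c
    rwa [count_map_some] at this
  · intro h c
    rw [count_map_some]
    by_cases hc : c ∈ s1.toList
    · exact h c hc
    · simp [List.count_eq_zero.mpr hc]
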